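-- pv_equiv track=rewrite | github.com/mytechnotalent/pixelproof | nation_state_engine.py | _first_digit_counts
-- ===== SOURCE A (Python) =====
-- def _first_digit_counts(scan_bytes):
--     """Count first significant digits in byte values for Benford analysis.
--
--     Args:
--         scan_bytes: Entropy-coded byte sequence.
--
--     Returns:
--         Dictionary mapping digit (1-9) to count.
--     """
--     counts = {d: 0 for d in range(1, 10)}
--     for byte_val in scan_bytes:
--         if byte_val == 0 or byte_val == 0xFF:
--             continue
--         first = int(str(byte_val).lstrip("0")[0]) if byte_val else 0
--         if 1 <= first <= 9:
--             counts[first] += 1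
--     return counts
-- ===== SOURCE B (Python) =====
-- def _first_digit_counts(scan_bytes):
--     def fd(v):
--         return int(str(v).lstrip("0")[0]) if v else 0
--     return {d: sum(1 for v in scan_bytes if v != 0 and v != 0xFF and fd(v) == d)
--             for d in range(1, 10)}
-- ===== Notes on version B (the rewrite author's own statement) =====
-- stated objective: alternative
-- what changed: A makes one pass updating a digit->count dict per element; B builds the result as a dict comprehension over digits 1..9, counting for each digit in a separate pass the bytes whose first significant digit equals it (tally-by-query instead of accumulate-by-update).
import Mathlib
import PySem

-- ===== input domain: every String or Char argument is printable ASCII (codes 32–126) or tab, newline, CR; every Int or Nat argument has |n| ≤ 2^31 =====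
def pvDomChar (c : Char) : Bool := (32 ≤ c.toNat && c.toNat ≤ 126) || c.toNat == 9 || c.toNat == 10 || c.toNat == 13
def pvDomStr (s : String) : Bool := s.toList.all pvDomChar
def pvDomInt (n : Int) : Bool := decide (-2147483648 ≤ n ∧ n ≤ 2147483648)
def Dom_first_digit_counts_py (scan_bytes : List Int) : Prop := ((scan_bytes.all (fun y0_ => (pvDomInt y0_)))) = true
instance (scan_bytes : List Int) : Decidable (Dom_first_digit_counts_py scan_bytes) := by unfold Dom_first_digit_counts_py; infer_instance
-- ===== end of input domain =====

-- B replaces A's single-pass dict-update loop by nine per-digit counting passes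
-- (one count per digit 1..9), a different decomposition of the same tally; objective: alternative.

-- shared helper: first = int(str(v).lstrip("0")[0]) if v else 0
-- (str(v) is PySem.Int.toChars; .lstrip("0") is dropWhile (== '0'), exact on decimal digit strings;
--  int(c) is PySem.Int.ofChars?; the .getD 0 / head fallback is reached only where Python raises
--  ValueError/IndexError, i.e. on negative v — excluded by Pre_)
def pyFD (v : Int) : Int :=
  if v ≠ 0 then
    match ((PySem.Int.toChars v).dropWhile (fun c => c == '0')).head? with
    | some c => (PySem.Int.ofChars? [c]).getD 0
    | none => 0
  else 0

-- ===== PORT A =====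
-- counts = {d: 0 for d in range(1, 10)}
def fdcInit : PySem.Dict Int Int :=
  (PySem.List.pyRange 1 10 1).foldl (fun d k => d.insert k 0) PySem.Dict.empty

-- one iteration of A's for-loop body
def fdcStep (d : PySem.Dict Int Int) (v : Int) : PySem.Dict Int Int :=
  if v = 0 ∨ v = 255 then d
  else
    let first := pyFD v
    if 1 ≤ first ∧ first ≤ 9 then d.modify first 0 (· + 1) else d

def first_digit_counts_py (scan_bytes : List Int) : List (Int × Int) :=
  (scan_bytes.foldl fdcStep fdcInit).items

-- ===== PORT B =====
-- {d: sum(1 for v in scan_bytes if v != 0 and v != 0xFF and fd(v) == d) for d in range(1, 10)}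
def first_digit_counts_py_alt (scan_bytes : List Int) : List (Int × Int) :=
  (PySem.List.pyRange 1 10 1).map (fun d =>
    (d, ((scan_bytes.countP (fun v => decide (v ≠ 0) && decide (v ≠ 255) && (pyFD v == d))) : Int)))

-- ===== PRECONDITION & SPEC =====
-- Pre_ excludes lists containing a negative element: there Python A raises ValueError
-- (int('-') after lstrip("0")), and B raises the same ValueError.
def Pre_first_digit_counts_py (scan_bytes : List Int) : Prop := ∀ v ∈ scan_bytes, 0 ≤ v
instance (scan_bytes : List Int) : Decidable (Pre_first_digit_counts_py scan_bytes) := by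
  unfold Pre_first_digit_counts_py; infer_instance

def pvWitness_first_digit_counts_py : List Int := [1, 10, 123, 0, 255, 37]

def Spec_first_digit_counts_py (scan_bytes : List Int) (out : List (Int × Int)) : Prop := out = first_digit_counts_py_alt scan_bytes
instance (scan_bytes : List Int) (out : List (Int × Int)) : Decidable (Spec_first_digit_counts_py scan_bytes out) := by unfold Spec_first_digit_counts_py; infer_instance

-- ===== CLAIM (what is proved, stated in full; the proofs are below) =====
def Claim_equal_first_digit_counts_py : Prop := ∀ (scan_bytes : List Int), Dom_first_digit_counts_py scan_bytes → Pre_first_digit_counts_py scan_bytes → Spec_first_digit_counts_py scan_bytes (first_digit_counts_py scan_bytes)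

-- ===== LEMMAS AND PROOFS =====

lemma fdc_keys_fold (xs : List Int) (d : PySem.Dict Int Int)
    (h : d.keys = [1, 2, 3, 4, 5, 6, 7, 8, 9]) :
    (xs.foldl fdcStep d).keys = [1, 2, 3, 4, 5, 6, 7, 8, 9] := by
  induction xs generalizing d with
  | nil => simpa using h
  | cons v xs ih =>
    apply ih
    by_cases h0 : v = 0 ∨ v = 255
    · simp only [fdcStep, if_pos h0]; exact h
    · by_cases h9 : 1 ≤ pyFD v ∧ pyFD v ≤ 9
      · have hc : d.contains (pyFD v) = true := by
          rw [PySem.Dict.contains_eq_decide_mem_keys, h]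
          simp only [List.mem_cons, List.not_mem_nil, or_false, decide_eq_true_eq]
          omega
        simp only [fdcStep, if_neg h0, if_pos h9]
        rw [PySem.Dict.keys_modify, PySem.Dict.keys_insert_of_contains _ _ hc]
        exact h
      · simp only [fdcStep, if_neg h0, if_neg h9]; exact h

lemma fdc_getD_fold (xs : List Int) (d : PySem.Dict Int Int) (k : Int)
    (hk : 1 ≤ k ∧ k ≤ 9) :
    (xs.foldl fdcStep d).getD k 0
      = d.getD k 0 + ((xs.countP (fun v => decide (v ≠ 0) && decide (v ≠ 255) && (pyFD v == k))) : Int) := by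
  induction xs generalizing d with
  | nil => simp
  | cons v xs ih =>
    rw [List.foldl_cons, ih, List.countP_cons]
    by_cases h0 : v = 0 ∨ v = 255
    · have hp : (decide (v ≠ 0) && decide (v ≠ 255) && (pyFD v == k)) = false := by
        rcases h0 with rfl | rfl <;> simp
      simp only [fdcStep, if_pos h0, hp]
      push_cast
      ring
    · by_cases h9 : 1 ≤ pyFD v ∧ pyFD v ≤ 9
      · simp only [fdcStep, if_neg h0, if_pos h9]
        rw [PySem.Dict.getD_modify]
        rcases not_or.mp h0 with ⟨hv0, hv255⟩
        by_cases hek : k = pyFD v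
        · have hp : (decide (v ≠ 0) && decide (v ≠ 255) && (pyFD v == k)) = true := by
            simp [hv0, hv255, hek]
          simp only [if_pos hek, hp]
          push_cast
          rw [← hek]
          ring
        · have hp : (decide (v ≠ 0) && decide (v ≠ 255) && (pyFD v == k)) = false := by
            simp [Ne.symm hek]
          simp only [if_neg hek, hp]
          push_cast
          ring
      · have hp : (decide (v ≠ 0) && decide (v ≠ 255) && (pyFD v == k)) = false := by
          by_contra hc
          simp only [Bool.not_eq_false, Bool.and_eq_true, beq_iff_eq] at hc
          exact h9 (hc.2 ▸ hk)
        simp only [fdcStep, if_neg h0, if_neg h9, hp]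
        push_cast
        ring

lemma fdcInit_getD (k : Int) (hk : 1 ≤ k ∧ k ≤ 9) : fdcInit.getD k 0 = 0 := by
  obtain ⟨h1, h2⟩ := hk
  interval_cases k <;> decide

-- ===== VERDICT (by name: the statement is the Claim_ definition above) =====
theorem first_digit_counts_py_spec : Claim_equal_first_digit_counts_py := by
  intro xs _ _
  unfold Spec_first_digit_counts_py first_digit_counts_py first_digit_counts_py_alt
  have hkeys := fdc_keys_fold xs fdcInit (by decide)
  have hr : PySem.List.pyRange 1 10 1 = [1, 2, 3, 4, 5, 6, 7, 8, 9] := by decide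
  rw [PySem.Dict.items_eq_map_keys _ (by rw [hkeys]; decide) 0, hkeys, ← hr]
  apply List.map_congr_left
  intro k hkmem
  have hk : 1 ≤ k ∧ k < 10 := PySem.List.mem_pyRange_one.mp hkmem
  have hk9 : 1 ≤ k ∧ k ≤ 9 := ⟨hk.1, by omega⟩
  rw [fdc_getD_fold xs fdcInit k hk9, fdcInit_getD k hk9, zero_add]
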